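-- pv_equiv track=rewrite | github.com/Benjamin-Catinella/Codewars-Python | write numbers in expanded form.py | expanded_form
-- ===== SOURCE A (Python) =====
-- def expanded_form(num):
--     numStr = str(num)
--     power = len(numStr)-1
--     numToPowerMap = []
--     finalstring = ""
--     for i, digit in enumerate(numStr):
--         if(int(digit) == 0):
--             power -= 1
--             continue
--         else:
--             numToPowerMap.append([int(digit),power])
--         power -= 1
--
--     additionsList = []
--     for num,power in numToPowerMap:
--        additionsList.append(num * (10**power))
--
--     for i,s in enumerate(additionsList):
--         finalstring += str(s)
--         if(i < len(additionsList)-1):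
--             finalstring += " + "
--
--     return finalstring
-- ===== SOURCE B (Python) =====
-- def expanded_form(num):
--     s = str(num)
--     n = len(s)
--     terms = [d + '0' * (n - 1 - i) for i, d in enumerate(s) if d != '0']
--     return ' + '.join(terms)
-- ===== Notes on version B (the rewrite author's own statement) =====
-- stated objective: simpler
-- what changed: B drops A's three passes (digit/power table, num*10**power arithmetic, re-stringification with an index-guarded separator) and in one comprehension builds each addend directly as the digit character followed by the right number of '0' characters, joined with ' + '.join.
import Mathlib
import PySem

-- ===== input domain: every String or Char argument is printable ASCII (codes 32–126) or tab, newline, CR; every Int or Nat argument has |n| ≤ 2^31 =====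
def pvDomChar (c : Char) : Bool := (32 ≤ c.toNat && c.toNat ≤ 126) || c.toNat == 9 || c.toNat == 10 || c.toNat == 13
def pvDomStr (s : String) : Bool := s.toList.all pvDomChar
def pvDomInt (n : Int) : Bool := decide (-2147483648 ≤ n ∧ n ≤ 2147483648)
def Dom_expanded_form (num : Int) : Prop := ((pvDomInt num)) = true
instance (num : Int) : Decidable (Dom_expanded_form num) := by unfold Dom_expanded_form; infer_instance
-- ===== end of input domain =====

-- B builds each addend directly as digit-char + zeros and joins once, instead of A's
-- number/power table, 10**p arithmetic and re-stringification (objective: simpler).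
-- Pre_ excludes negative num, where A raises ValueError (int('-') on the sign character).


-- ===== PORT A =====
-- int(digit) on a one-character string; under Pre_ (0 ≤ num) every character of str(num)
-- is a decimal digit, so the parse never fails and the default is never taken (exact there).
def pyIntOfDigit (c : Char) : Int := (PySem.Int.ofChars? [c]).getD 0

def expanded_form (num : Int) : String :=
  let numStr := PySem.Int.toChars num                      -- numStr = str(num)
  let power : Int := (numStr.length : Int) - 1
  -- for i, digit in enumerate(numStr): … (state: power, numToPowerMap; the index is unused)
  let st := (PySem.List.enumerate numStr).foldl
    (fun (st : Int × List (Int × Int)) pd =>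
      if pyIntOfDigit pd.2 = 0 then (st.1 - 1, st.2)
      else (st.1 - 1, st.2 ++ [(pyIntOfDigit pd.2, st.1)]))
    (power, [])
  -- for num, power in numToPowerMap: additionsList.append(num * 10**power)
  -- 10**power: under Pre_ every recorded power is ≥ 0, so ^ on Nat via .toNat is exact there
  let additionsList := st.2.foldl (fun acc np => acc ++ [np.1 * 10 ^ np.2.toNat]) ([] : List Int)
  -- for i, s in enumerate(additionsList): finalstring += str(s) (+ " + " unless last)
  let finalstring := (PySem.List.enumerate additionsList).foldl
    (fun (acc : List Char) is =>
      if is.1 < (additionsList.length : Int) - 1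
      then (acc ++ PySem.Int.toChars is.2) ++ [' ', '+', ' ']
      else acc ++ PySem.Int.toChars is.2)
    []
  String.ofList finalstring

-- ===== PORT B =====
def expanded_form_alt (num : Int) : String :=
  let s := PySem.Int.toChars num                           -- s = str(num)
  let n := s.length
  -- [d + '0' * (n - 1 - i) for i, d in enumerate(s) if d != '0']  ('0'*k is [] for k ≤ 0)
  let terms := (PySem.List.enumerate s).foldl
    (fun (acc : List (List Char)) id =>
      if id.2 ≠ '0' then acc ++ [id.2 :: List.replicate ((n : Int) - 1 - id.1).toNat '0'] else acc)
    []
  String.ofList (PySem.Chars.join [' ', '+', ' '] terms)   -- ' + '.join(terms)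

-- ===== PRECONDITION & SPEC =====
-- Pre_ excludes exactly the negative inputs: there str(num) starts with '-' and A's
-- int(digit) raises ValueError on the first iteration.
def Pre_expanded_form (num : Int) : Prop := 0 ≤ num
instance (num : Int) : Decidable (Pre_expanded_form num) := by unfold Pre_expanded_form; infer_instance
def pvWitness_expanded_form : Int := (70304)

def Spec_expanded_form (num : Int) (out : String) : Prop := out = expanded_form_alt num
instance (num : Int) (out : String) : Decidable (Spec_expanded_form num out) := by unfold Spec_expanded_form; infer_instance

-- ===== CLAIM (what is proved, stated in full; the proofs are below) =====
def Claim_equal_expanded_form : Prop := ∀ (num : Int), Dom_expanded_form num → Pre_expanded_form num → Spec_expanded_form num (expanded_form num)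

-- ===== LEMMAS AND PROOFS =====

-- Decimal printing of a Nat, most significant digit first (proof-side model of Nat.toDigits 10).
def decRep (n : Nat) : List Char :=
  if _h : n < 10 then [Nat.digitChar n]
  else decRep (n / 10) ++ [Nat.digitChar (n % 10)]
decreasing_by exact Nat.div_lt_self (by omega) (by omega)

theorem toDigitsCore_eq_decRep : ∀ (f n : Nat) (acc : List Char), n < f →
    Nat.toDigitsCore 10 f n acc = decRep n ++ acc := by
  intro f
  induction f with
  | zero => intro n acc h; omega
  | succ f ih =>
    intro n acc h
    rw [Nat.toDigitsCore]
    by_cases h0 : n / 10 = 0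
    · have hn : n < 10 := by omega
      rw [decRep]
      simp [h0, hn, Nat.mod_eq_of_lt hn]
    · have hge : ¬ n < 10 := by
        intro hlt; exact h0 (Nat.div_eq_of_lt hlt)
      rw [decRep]
      simp only [hge, dite_false]
      simp only [h0, if_false]
      rw [ih (n / 10) _ (by omega)]
      simp

theorem toDigits_eq_decRep (n : Nat) : Nat.toDigits 10 n = decRep n := by
  rw [Nat.toDigits, toDigitsCore_eq_decRep (n + 1) n [] (by omega)]
  simp

def digitChars : List Char := ['0','1','2','3','4','5','6','7','8','9']

theorem digitChar_mem (k : Nat) (h : k < 10) : Nat.digitChar k ∈ digitChars := by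
  interval_cases k <;> decide

theorem mem_decRep (n : Nat) : ∀ c ∈ decRep n, c ∈ digitChars := by
  induction n using decRep.induct with
  | case1 n h =>
    rw [decRep]; simp only [h, dite_true, List.mem_singleton]
    rintro c rfl; exact digitChar_mem n h
  | case2 n h ih =>
    rw [decRep]; simp only [h, dite_false, List.mem_append, List.mem_singleton]
    rintro c (hc | rfl)
    · exact ih c hc
    · exact digitChar_mem _ (Nat.mod_lt _ (by omega))

theorem digit_facts (c : Char) (hc : c ∈ digitChars) :
    0 ≤ pyIntOfDigit c ∧ pyIntOfDigit c ≤ 9 ∧ Nat.digitChar (pyIntOfDigit c).toNat = c ∧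
      (pyIntOfDigit c = 0 ↔ c = '0') := by
  fin_cases hc <;> refine ⟨by decide, by decide, by decide, by decide, ?_⟩ <;> decide

theorem decRep_mul_pow (d p : Nat) (h1 : 1 ≤ d) (h9 : d ≤ 9) :
    decRep (d * 10 ^ p) = Nat.digitChar d :: List.replicate p '0' := by
  induction p with
  | zero =>
    have h : d * 10 ^ 0 = d := by ring
    rw [h, decRep]
    simp [show d < 10 by omega]
  | succ p ih =>
    rw [decRep]
    have hmul : d * 10 ^ (p + 1) = d * 10 ^ p * 10 := by ring
    have hge : ¬ d * 10 ^ (p + 1) < 10 := by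
      have h10 : 10 ≤ 10 ^ (p + 1) := by
        calc (10:Nat) = 10 ^ 1 := by norm_num
        _ ≤ 10 ^ (p + 1) := Nat.pow_le_pow_right (by omega) (by omega)
      have := Nat.le_mul_of_pos_left (10 ^ (p + 1)) (show 0 < d by omega)
      omega
    have hdiv : d * 10 ^ (p + 1) / 10 = d * 10 ^ p := by
      rw [hmul, Nat.mul_div_cancel _ (by omega)]
    have hmod : d * 10 ^ (p + 1) % 10 = 0 := by
      rw [hmul, Nat.mul_mod_left]
    simp only [hge, dite_false, hdiv, hmod, ih]
    simp [List.replicate_succ']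
    decide

theorem intercalate_cons₂ {sep a b : List Char} {l : List (List Char)} :
    List.intercalate sep (a :: b :: l) = a ++ sep ++ List.intercalate sep (b :: l) := by
  simp [List.intercalate, List.intersperse]

-- A's first loop, denotationally: digit/power pairs in order, power counting down from p.
def pairsOf : List Char → Int → List (Int × Int)
  | [], _ => []
  | c :: t, p => (if pyIntOfDigit c = 0 then [] else [(pyIntOfDigit c, p)]) ++ pairsOf t (p - 1)

theorem loop1_eq (ds : List Char) : ∀ (i0 p0 : Int) (acc : List (Int × Int)),
    (PySem.List.enumerate ds i0).foldl
      (fun (st : Int × List (Int × Int)) pd =>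
        if pyIntOfDigit pd.2 = 0 then (st.1 - 1, st.2)
        else (st.1 - 1, st.2 ++ [(pyIntOfDigit pd.2, st.1)]))
      (p0, acc)
    = (p0 - ds.length, acc ++ pairsOf ds p0) := by
  induction ds with
  | nil => intro i0 p0 acc; simp [PySem.List.enumerate, pairsOf]
  | cons c t ih =>
    intro i0 p0 acc
    rw [PySem.List.enumerate_cons, List.foldl_cons]
    by_cases h0 : pyIntOfDigit c = 0
    · rw [if_pos h0, ih]
      simp only [pairsOf, if_pos h0, List.nil_append, List.length_cons, Prod.mk.injEq]
      exact ⟨by push_cast; ring, trivial⟩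
    · rw [if_neg h0, ih]
      simp only [pairsOf, if_neg h0, List.length_cons, List.append_assoc,
        List.singleton_append, Prod.mk.injEq]
      exact ⟨by push_cast; ring, trivial⟩

-- B's terms, parametrized directly by the power of the leading position.
def termsAux : List Char → Int → List (List Char)
  | [], _ => []
  | c :: t, p => (if c ≠ '0' then [c :: List.replicate p.toNat '0'] else []) ++ termsAux t (p - 1)

theorem loop1b_eq (n : Nat) (ds : List Char) : ∀ (i0 : Int) (acc : List (List Char)),
    (PySem.List.enumerate ds i0).foldl
      (fun (acc : List (List Char)) id =>
        if id.2 ≠ '0' then acc ++ [id.2 :: List.replicate ((n : Int) - 1 - id.1).toNat '0'] else acc)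
      acc
    = acc ++ termsAux ds ((n : Int) - 1 - i0) := by
  induction ds with
  | nil => intro i0 acc; simp [PySem.List.enumerate, termsAux]
  | cons c t ih =>
    intro i0 acc
    rw [PySem.List.enumerate_cons, List.foldl_cons]
    by_cases h0 : c ≠ '0'
    · rw [if_pos h0, ih]
      simp only [termsAux, if_pos h0, List.append_assoc, List.singleton_append]
      have : (n : Int) - 1 - (i0 + 1) = (n : Int) - 1 - i0 - 1 := by ring
      rw [this]
    · rw [if_neg h0, ih]
      simp only [termsAux, if_neg h0, List.nil_append]
      have : (n : Int) - 1 - (i0 + 1) = (n : Int) - 1 - i0 - 1 := by ring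
      rw [this]

theorem map_pairs_eq (ds : List Char) (hds : ∀ c ∈ ds, c ∈ digitChars) :
    ∀ p : Int, (ds.length : Int) - 1 ≤ p →
    (pairsOf ds p).map (fun np => PySem.Int.toChars (np.1 * 10 ^ np.2.toNat)) = termsAux ds p := by
  induction ds with
  | nil => intro p hp; simp [pairsOf, termsAux]
  | cons c t ih =>
    intro p hp
    have hc := hds c (List.mem_cons_self)
    obtain ⟨hnn, hle9, hchar, hzero⟩ := digit_facts c hc
    have ht : ∀ x ∈ t, x ∈ digitChars := fun x hx => hds x (List.mem_cons_of_mem _ hx)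
    have hp' : (t.length : Int) - 1 ≤ p - 1 := by
      simp only [List.length_cons] at hp; push_cast at hp ⊢; omega
    by_cases h0 : pyIntOfDigit c = 0
    · have hc0 : c = '0' := hzero.mp h0
      simp only [pairsOf, List.nil_append, termsAux, hc0, ne_eq,
        not_true_eq_false, if_false]
      exact ih ht (p - 1) hp'
    · have hc0 : c ≠ '0' := fun h => h0 (hzero.mpr h)
      simp only [pairsOf, if_neg h0, termsAux, if_pos hc0, List.singleton_append,
        List.map_cons]
      rw [ih ht (p - 1) hp']
      have hp0 : 0 ≤ p := by
        simp only [List.length_cons] at hp; push_cast at hp; omega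
      have hterm : PySem.Int.toChars (pyIntOfDigit c * 10 ^ p.toNat)
          = c :: List.replicate p.toNat '0' := by
        have hd1 : 1 ≤ (pyIntOfDigit c).toNat := by omega
        have hd9 : (pyIntOfDigit c).toNat ≤ 9 := by omega
        have hposint : (0:Int) ≤ pyIntOfDigit c * 10 ^ p.toNat :=
          mul_nonneg hnn (by positivity)
        have hcast : pyIntOfDigit c * 10 ^ p.toNat
            = (((pyIntOfDigit c).toNat * 10 ^ p.toNat : Nat) : Int) := by
          push_cast [Int.toNat_of_nonneg hnn]; ring
        rw [PySem.Int.toChars, if_neg (not_lt.mpr hposint), hcast, Int.toNat_natCast,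
          toDigits_eq_decRep, decRep_mul_pow _ _ hd1 hd9, hchar]
      rw [hterm]

theorem loop3_eq (sep : List Char) : ∀ (xs : List Int) (i0 L : Int) (acc : List Char),
    i0 + xs.length = L →
    (PySem.List.enumerate xs i0).foldl
      (fun (acc : List Char) is =>
        if is.1 < L - 1
        then (acc ++ PySem.Int.toChars is.2) ++ sep
        else acc ++ PySem.Int.toChars is.2)
      acc
    = acc ++ sep.intercalate (xs.map PySem.Int.toChars) := by
  intro xs
  induction xs with
  | nil => intro i0 L acc h; simp [PySem.List.enumerate, List.intercalate]
  | cons x t ih =>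
    intro i0 L acc h
    rw [PySem.List.enumerate_cons, List.foldl_cons]
    cases t with
    | nil =>
      simp only [List.length_cons, List.length_nil] at h
      rw [if_neg (by omega)]
      simp [PySem.List.enumerate, List.intercalate]
    | cons y t' =>
      simp only [List.length_cons] at h
      rw [if_pos (by push_cast at h; omega)]
      rw [ih (i0 + 1) L _ (by simp only [List.length_cons] at h ⊢; push_cast at h ⊢; omega)]
      simp only [List.map_cons, intercalate_cons₂, List.append_assoc]

-- ===== VERDICT (by name: the statement is the Claim_ definition above) =====
theorem expanded_form_spec : Claim_equal_expanded_form := by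
  intro num _ hpre
  unfold Pre_expanded_form at hpre
  unfold Spec_expanded_form
  simp only [expanded_form, expanded_form_alt]
  have hdig : ∀ c ∈ PySem.Int.toChars num, c ∈ digitChars := by
    rw [PySem.Int.toChars, if_neg (by omega), toDigits_eq_decRep]
    exact mem_decRep num.toNat
  rw [loop1_eq (PySem.Int.toChars num) 0 (((PySem.Int.toChars num).length : Int) - 1) []]
  dsimp only
  simp only [List.nil_append]
  simp only [PySem.List.foldl_append_singleton_eq_map, List.nil_append]
  rw [loop3_eq [' ', '+', ' '] _ 0 _ [] (by ring)]
  rw [loop1b_eq (PySem.Int.toChars num).length (PySem.Int.toChars num) 0 []]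
  simp only [List.nil_append, List.map_map, PySem.Chars.join, Function.comp_def]
  rw [map_pairs_eq (PySem.Int.toChars num) hdig _ le_rfl]
  norm_num
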